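-- pv_equiv track=rewrite | github.com/wpwilson10/spacedrep | src/spacedrep/apkg_reader.py | detect_field_mapping
-- ===== SOURCE A (Python) =====
-- QUESTION_FIELD_NAMES = {"front", "question", "prompt", "q"}
--
-- ANSWER_FIELD_NAMES = {"back", "answer", "implementation", "a", "response"}
--
-- def detect_field_mapping(
--     field_names: list[str],
--     question_field: str | None,
--     answer_field: str | None,
-- ) -> tuple[int, int]:
--     """Returns (question_index, answer_index).
--
--     Priority: explicit params > name matching > positional (0, 1).
--     """
--     names_lower = [n.lower() for n in field_names]
--
--     # Question field
--     if question_field: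
--         try:
--             qi = names_lower.index(question_field.lower())
--         except ValueError:
--             msg = f"Question field '{question_field}' not found. Available: {field_names}"
--             raise ValueError(msg) from None
--     else:
--         qi = find_field_index(names_lower, QUESTION_FIELD_NAMES)
--         if qi is None:
--             qi = 0
--
--     # Answer field
--     if answer_field:
--         try:
--             ai = names_lower.index(answer_field.lower())
--         except ValueError:
--             msg = f"Answer field '{answer_field}' not found. Available: {field_names}"
--             raise ValueError(msg) from None
--     else:
--         ai = find_field_index(names_lower, ANSWER_FIELD_NAMES)
--         if ai is None:
--             ai = 1 if len(field_names) > 1 else 0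
--
--     return qi, ai
--
-- def find_field_index(names_lower: list[str], candidates: set[str]) -> int | None:
--     """Find the first field name that matches a candidate set."""
--     for i, name in enumerate(names_lower):
--         if name in candidates:
--             return i
--     return None
-- ===== SOURCE B (Python) =====
-- QUESTION_FIELD_NAMES = {"front", "question", "prompt", "q"}
--
-- ANSWER_FIELD_NAMES = {"back", "answer", "implementation", "a", "response"}
--
-- def detect_field_mapping(field_names, question_field, answer_field):
--     """Returns (question_index, answer_index) by min-over-candidate first positions."""
--     names_lower = [n.lower() for n in field_names]
--
--     def resolve(explicit, candidates, label, default):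
--         if explicit:
--             try:
--                 return names_lower.index(explicit.lower())
--             except ValueError:
--                 msg = f"{label} field '{explicit}' not found. Available: {field_names}"
--                 raise ValueError(msg) from None
--         best = min((names_lower.index(c) for c in candidates if c in names_lower), default=None)
--         return default if best is None else best
--
--     qi = resolve(question_field, QUESTION_FIELD_NAMES, "Question", 0)
--     ai = resolve(answer_field, ANSWER_FIELD_NAMES, "Answer", 1 if len(field_names) > 1 else 0)
--     return qi, ai
-- ===== Notes on version B (the rewrite author's own statement) =====
-- stated objective: idiomatic
-- what changed: A scans the field names once testing each against the candidate set; B instead looks up each candidate name's first position in the list (list.index) and takes the min over the found positions, resolving by candidate rather than by field.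
import Mathlib
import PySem

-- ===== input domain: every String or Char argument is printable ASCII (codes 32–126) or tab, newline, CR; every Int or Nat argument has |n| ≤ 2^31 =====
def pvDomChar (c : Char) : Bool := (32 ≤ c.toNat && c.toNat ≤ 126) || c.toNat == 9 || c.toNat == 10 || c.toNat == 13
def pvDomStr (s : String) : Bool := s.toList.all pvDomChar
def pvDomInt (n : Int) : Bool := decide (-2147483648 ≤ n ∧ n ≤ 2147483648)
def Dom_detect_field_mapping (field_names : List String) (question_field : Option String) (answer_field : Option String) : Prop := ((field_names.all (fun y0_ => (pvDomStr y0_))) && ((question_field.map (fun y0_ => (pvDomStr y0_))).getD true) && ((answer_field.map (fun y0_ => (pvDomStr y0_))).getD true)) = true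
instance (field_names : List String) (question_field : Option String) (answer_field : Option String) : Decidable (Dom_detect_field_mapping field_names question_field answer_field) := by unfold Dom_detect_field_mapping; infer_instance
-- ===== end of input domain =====

-- B replaces A's single scan testing set membership by a first-occurrence position
-- lookup per candidate name with a min over the found positions (more idiomatic);
-- return value only — A performs no observable mutation.

-- ===== PORT A =====
def QUESTION_FIELD_NAMES : PySem.Set String := PySem.Set.ofList ["front", "question", "prompt", "q"]
def ANSWER_FIELD_NAMES : PySem.Set String := PySem.Set.ofList ["back", "answer", "implementation", "a", "response"]

-- the 'for i, name in enumerate(names_lower)' loop of find_field_index (i = running index)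
def find_field_index_go (i : Int) (names_lower : List String) (candidates : PySem.Set String) : Option Int :=
  match names_lower with
  | [] => none
  | name :: rest =>
      if candidates.contains name then some i else find_field_index_go (i + 1) rest candidates

def find_field_index (names_lower : List String) (candidates : PySem.Set String) : Option Int :=
  find_field_index_go 0 names_lower candidates

def detect_field_mapping (field_names : List String) (question_field : Option String) (answer_field : Option String) : Int × Int :=
  let names_lower := field_names.map PySem.Str.lower
  let qi : Int :=
    match question_field with
    | some q =>
        if q = "" then  -- falsy explicit param: Python falls to the else-branch
          match find_field_index names_lower QUESTION_FIELD_NAMES with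
          | some i => i
          | none => 0
        else
          match PySem.List.index? names_lower (PySem.Str.lower q) with
          | some i => (i : Int)
          | none => 0   -- Python raises ValueError here; excluded by Pre_
    | none =>
        match find_field_index names_lower QUESTION_FIELD_NAMES with
        | some i => i
        | none => 0
  let ai : Int :=
    match answer_field with
    | some a =>
        if a = "" then
          match find_field_index names_lower ANSWER_FIELD_NAMES with
          | some i => i
          | none => if 1 < field_names.length then 1 else 0
        else
          match PySem.List.index? names_lower (PySem.Str.lower a) with
          | some i => (i : Int)
          | none => 0   -- Python raises ValueError here; excluded by Pre_
    | none =>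
        match find_field_index names_lower ANSWER_FIELD_NAMES with
        | some i => i
        | none => if 1 < field_names.length then 1 else 0
  (qi, ai)

-- ===== PORT B =====
-- min((names_lower.index(c) for c in candidates if c in names_lower), default=None)
def best_candidate_index (names_lower : List String) (candidates : PySem.Set String) : Option Int :=
  PySem.List.min?
    ((candidates.filter (fun c => names_lower.contains c)).map
      (fun c => (((PySem.List.index? names_lower c).getD 0 : Nat) : Int)))  -- getD: the filter guarantees `some`
    (fun y => y)

def resolve_index (names_lower : List String) (explicit : Option String) (candidates : PySem.Set String) (dflt : Int) : Int :=
  match explicit with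
  | some e =>
      if e = "" then
        match best_candidate_index names_lower candidates with
        | none => dflt
        | some b => b
      else
        match PySem.List.index? names_lower (PySem.Str.lower e) with
        | some i => (i : Int)
        | none => 0   -- Python raises ValueError here; excluded by Pre_
  | none =>
      match best_candidate_index names_lower candidates with
      | none => dflt
      | some b => b

def detect_field_mapping_alt (field_names : List String) (question_field : Option String) (answer_field : Option String) : Int × Int :=
  let names_lower := field_names.map PySem.Str.lower
  (resolve_index names_lower question_field QUESTION_FIELD_NAMES 0,
   resolve_index names_lower answer_field ANSWER_FIELD_NAMES (if 1 < field_names.length then 1 else 0))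

-- ===== PRECONDITION & SPEC =====
-- Pre_ excludes exactly the inputs on which A raises ValueError: a non-empty explicit
-- question/answer field whose lowercased name is not among the lowercased field names.
def Pre_detect_field_mapping (field_names : List String) (question_field : Option String) (answer_field : Option String) : Prop :=
  (question_field.all (fun q => q == "" || (field_names.map PySem.Str.lower).contains (PySem.Str.lower q))) = true
  ∧ (answer_field.all (fun a => a == "" || (field_names.map PySem.Str.lower).contains (PySem.Str.lower a))) = true
instance (field_names : List String) (question_field : Option String) (answer_field : Option String) : Decidable (Pre_detect_field_mapping field_names question_field answer_field) := by unfold Pre_detect_field_mapping; infer_instance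

def pvWitness_detect_field_mapping : List String × Option String × Option String :=
  (["Front", "Back"], some "Front", none)

def Spec_detect_field_mapping (field_names : List String) (question_field : Option String) (answer_field : Option String) (out : Int × Int) : Prop := out = detect_field_mapping_alt field_names question_field answer_field
instance (field_names : List String) (question_field : Option String) (answer_field : Option String) (out : Int × Int) : Decidable (Spec_detect_field_mapping field_names question_field answer_field out) := by unfold Spec_detect_field_mapping; infer_instance

-- ===== CLAIM (what is proved, stated in full; the proofs are below) =====
def Claim_equal_detect_field_mapping : Prop := ∀ (field_names : List String) (question_field : Option String) (answer_field : Option String), Dom_detect_field_mapping field_names question_field answer_field → Pre_detect_field_mapping field_names question_field answer_field → Spec_detect_field_mapping field_names question_field answer_field (detect_field_mapping field_names question_field answer_field)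

-- ===== LEMMAS AND PROOFS =====

-- the scan at index i is the scan at index 0 shifted by i
theorem ffi_go_shift (S : PySem.Set String) (l : List String) (i : Int) :
    find_field_index_go i l S = (find_field_index_go 0 l S).map (fun k => k + i) := by
  induction l generalizing i with
  | nil => simp [find_field_index_go]
  | cons x rest ih =>
      simp only [find_field_index_go]
      split
      · simp
      · rw [ih (i + 1), show (0:Int) + 1 = 1 from rfl, ih 1, Option.map_map]
        congr 1
        funext k
        simp
        omega

theorem foldl_min_map_add_one (t : List Int) (x : Int) :
    (t.map (fun y => y + 1)).foldl min (x + 1) = t.foldl min x + 1 := by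
  induction t generalizing x with
  | nil => simp
  | cons a t ih => simpa [min_add_add_right] using ih (min x a)

theorem min?_map_add_one (xs : List Int) :
    PySem.List.min? (xs.map (fun y => y + 1)) (fun y => y) =
      (PySem.List.min? xs (fun y => y)).map (fun y => y + 1) := by
  cases xs with
  | nil =>
      have h : PySem.List.min? ([] : List Int) (fun y => y) = none :=
        (PySem.List.min?_eq_none_iff _ _).mpr rfl
      simp [h]
  | cons x t => rw [List.map_cons, PySem.List.min?_id_cons, PySem.List.min?_id_cons,
      foldl_min_map_add_one]; rfl

-- cons step, head matches: the min of the candidate positions is 0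
theorem best_cons_of_mem (S : PySem.Set String) (x : String) (l : List String)
    (hx : S.contains x = true) :
    best_candidate_index (x :: l) S = some 0 := by
  have hxm : x ∈ S := by simpa using hx
  have h0 : (0 : Int) ∈ (S.filter (fun c => (x :: l).contains c)).map
      (fun c => (((PySem.List.index? (x :: l) c).getD 0 : Nat) : Int)) := by
    refine List.mem_map.mpr ⟨x, List.mem_filter.mpr ⟨hxm, by simp⟩, ?_⟩
    rw [PySem.List.index?_cons_self]
    rfl
  unfold best_candidate_index
  cases h : PySem.List.min? ((S.filter (fun c => (x :: l).contains c)).map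
      (fun c => (((PySem.List.index? (x :: l) c).getD 0 : Nat) : Int))) (fun y => y) with
  | none =>
      rw [PySem.List.min?_eq_none_iff] at h
      rw [h] at h0
      simp at h0
  | some m =>
      have hmem := PySem.List.min?_mem h
      have hle := PySem.List.min?_isMin h 0 h0
      obtain ⟨c, -, hc⟩ := List.mem_map.mp hmem
      have : 0 ≤ m := hc ▸ Int.natCast_nonneg _
      simp only [Option.some_inj]
      omega

-- cons step, head does not match: everything shifts by one
theorem best_cons_of_not_mem (S : PySem.Set String) (x : String) (l : List String)
    (hx : S.contains x = false) :
    best_candidate_index (x :: l) S = (best_candidate_index l S).map (fun y => y + 1) := by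
  have hne : ∀ c ∈ S, ¬ (x = c) := by
    intro c hc he
    subst he
    simp at hx
    exact hx hc
  unfold best_candidate_index
  have hfil : S.filter (fun c => (x :: l).contains c) = S.filter (fun c => l.contains c) := by
    apply List.filter_congr
    intro c hc
    have hcx : (c == x) = false := beq_eq_false_iff_ne.mpr (fun h => hne c hc h.symm)
    rw [List.contains_cons, hcx, Bool.false_or]
  rw [hfil]
  have hmap : (S.filter (fun c => l.contains c)).map
      (fun c => (((PySem.List.index? (x :: l) c).getD 0 : Nat) : Int)) =
      ((S.filter (fun c => l.contains c)).map
        (fun c => (((PySem.List.index? l c).getD 0 : Nat) : Int))).map (fun y => y + 1) := by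
    rw [List.map_map]
    apply List.map_congr_left
    intro c hc
    obtain ⟨hcS, hcl⟩ := List.mem_filter.mp hc
    have hxc : x ≠ c := hne c hcS
    have hsome : (PySem.List.index? l c).isSome := by
      rw [PySem.List.index?_isSome_iff]
      simpa [List.contains_iff_mem] using hcl
    obtain ⟨k, hk⟩ := Option.isSome_iff_exists.mp hsome
    simp only [Function.comp_apply, PySem.List.index?_cons_of_ne l hxc, hk, Option.map_some,
      Option.getD_some]
    push_cast
    ring
  rw [hmap, min?_map_add_one]

-- B's min over candidate first positions is A's first-match scan
theorem best_eq_find (S : PySem.Set String) (l : List String) :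
    best_candidate_index l S = find_field_index l S := by
  induction l with
  | nil =>
      unfold best_candidate_index find_field_index find_field_index_go
      rw [PySem.List.min?_eq_none_iff]
      simp
  | cons x rest ih =>
      unfold find_field_index find_field_index_go
      cases hx : S.contains x with
      | true => rw [best_cons_of_mem S x rest hx]; simp
      | false =>
          rw [best_cons_of_not_mem S x rest hx, ih]
          unfold find_field_index
          simp only [Bool.false_eq_true, if_false]
          norm_num [ffi_go_shift S rest 1]

-- ===== VERDICT (by name: the statement is the Claim_ definition above) =====
theorem detect_field_mapping_spec : Claim_equal_detect_field_mapping := by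
  intro field_names question_field answer_field _ _
  unfold Spec_detect_field_mapping
  simp only [detect_field_mapping, detect_field_mapping_alt, resolve_index, best_eq_find]
  refine Prod.ext ?_ ?_
  · cases question_field with
    | none =>
        cases find_field_index (List.map PySem.Str.lower field_names) QUESTION_FIELD_NAMES <;> rfl
    | some q =>
        by_cases hq : q = ""
        · simp only [hq]
          cases find_field_index (List.map PySem.Str.lower field_names) QUESTION_FIELD_NAMES <;> rfl
        · simp only [if_neg hq]
  · cases answer_field with
    | none =>
        cases find_field_index (List.map PySem.Str.lower field_names) ANSWER_FIELD_NAMES <;> rfl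
    | some a =>
        by_cases ha : a = ""
        · simp only [ha]
          cases find_field_index (List.map PySem.Str.lower field_names) ANSWER_FIELD_NAMES <;> rfl
        · simp only [if_neg ha]
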